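-- pv_equiv track=rewrite | github.com/parkj6/CS325 | p2/helpers.py | GenOutputStrs
-- ===== SOURCE A (Python) =====
-- def GenOutputStrs(str1, str2, TraceArr):
--
-- 	# declare output strings
-- 	OutString1 = []
-- 	OutString2 = []
--
-- 	# declare itterators
-- 	S1 = 1
-- 	S2 = 1
--
-- 	# loop that calculates the values of the output strings
-- 	for x in range(0, len(TraceArr)):
--
-- 		# the motherfuckin shit!
-- 		if(TraceArr[x] == 'U'): # came from above (insert)
-- 			OutString1.append('-')
-- 			OutString2.append(str2[S2])
-- 			S2 = S2+1
-- 		elif(TraceArr[x] == 'D'): # came from the diagonal (align)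
-- 			OutString1.append(str1[S1])
-- 			OutString2.append(str2[S2])
-- 			S1 = S1+1
-- 			S2 = S2+1
-- 		else:
-- 			OutString1.append(str1[S1]) # came from the left (delete)
-- 			OutString2.append('-')
-- 			S1 = S1+1
--
-- 	# return the calculated output strings
-- 	return [OutString1, OutString2]
-- ===== SOURCE B (Python) =====
-- def GenOutputStrs(str1, str2, TraceArr):
--     # precompute the str1/str2 cursor value before each step (table of indices)
--     idx1 = [1]
--     for t in TraceArr:
--         idx1.append(idx1[-1] + (t != 'U'))
--     idx2 = [1]
--     for t in TraceArr:
--         idx2.append(idx2[-1] + (t == 'U' or t == 'D'))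
--     # select characters by the precomputed indices
--     OutString1 = ['-' if t == 'U' else str1[i] for t, i in zip(TraceArr, idx1)]
--     OutString2 = [str2[i] if t == 'U' or t == 'D' else '-' for t, i in zip(TraceArr, idx2)]
--     return [OutString1, OutString2]
-- ===== Notes on version B (the rewrite author's own statement) =====
-- stated objective: alternative
-- what changed: A interleaves cursor bookkeeping and character emission in one stateful loop over four pieces of state; B first precomputes the two cursor-index tables and then builds each output string by an independent zip-comprehension over (direction, index) pairs.
import Mathlib
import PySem

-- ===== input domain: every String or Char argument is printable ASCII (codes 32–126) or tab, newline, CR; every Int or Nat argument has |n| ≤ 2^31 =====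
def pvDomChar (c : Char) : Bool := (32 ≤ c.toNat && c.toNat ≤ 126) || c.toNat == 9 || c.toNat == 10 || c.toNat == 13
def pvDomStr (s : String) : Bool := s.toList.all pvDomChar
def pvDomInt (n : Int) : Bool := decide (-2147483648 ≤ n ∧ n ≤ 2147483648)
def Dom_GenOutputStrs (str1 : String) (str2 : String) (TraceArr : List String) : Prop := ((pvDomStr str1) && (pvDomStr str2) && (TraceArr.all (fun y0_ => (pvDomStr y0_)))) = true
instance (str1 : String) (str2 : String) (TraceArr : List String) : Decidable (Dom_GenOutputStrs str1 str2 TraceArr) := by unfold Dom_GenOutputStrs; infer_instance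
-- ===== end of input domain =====

-- B restructures A: instead of one stateful loop interleaving cursor updates and emission,
-- B precomputes the two cursor-index tables and then builds each output independently.

-- shared primitive: Python's s[i] as a 1-character string ("" outside the range, which Pre_ excludes)
def pyChar (s : String) (i : Int) : String :=
  match PySem.Str.pyGet? s i with
  | some c => String.ofList [c]
  | none => ""

-- ===== PORT A =====
-- the loop body of A (state: OutString1, OutString2, S1, S2)
def stepA (str1 str2 : String) (st : List String × List String × Int × Int) (t : String) :
    List String × List String × Int × Int :=
  if t == "U" then (st.1 ++ ["-"], st.2.1 ++ [pyChar str2 st.2.2.2], st.2.2.1, st.2.2.2 + 1)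
  else if t == "D" then (st.1 ++ [pyChar str1 st.2.2.1], st.2.1 ++ [pyChar str2 st.2.2.2], st.2.2.1 + 1, st.2.2.2 + 1)
  else (st.1 ++ [pyChar str1 st.2.2.1], st.2.1 ++ ["-"], st.2.2.1 + 1, st.2.2.2)

def GenOutputStrs (str1 : String) (str2 : String) (TraceArr : List String) : List (List String) :=
  let st := TraceArr.foldl (stepA str1 str2) ([], [], 1, 1)
  [st.1, st.2.1]

-- ===== PORT B =====
-- per-direction cursor increments: (t != 'U') and (t == 'U' or t == 'D') as ints
def d1 (t : String) : Int := if !(t == "U") then 1 else 0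
def d2 (t : String) : Int := if t == "U" || t == "D" then 1 else 0

-- table-building loop body: append idx[-1] + increment
def stepT (d : String → Int) (acc : List Int) (t : String) : List Int :=
  acc ++ [(PySem.List.pyGet? acc (-1)).getD 0 + d t]

def GenOutputStrs_alt (str1 : String) (str2 : String) (TraceArr : List String) : List (List String) :=
  let idx1 := TraceArr.foldl (stepT d1) [1]
  let idx2 := TraceArr.foldl (stepT d2) [1]
  let o1 := (TraceArr.zip idx1).map (fun ti => if ti.1 == "U" then "-" else pyChar str1 ti.2)
  let o2 := (TraceArr.zip idx2).map (fun ti => if ti.1 == "U" || ti.1 == "D" then pyChar str2 ti.2 else "-")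
  [o1, o2]

-- ===== PRECONDITION & SPEC =====
-- Pre_ excludes exactly the inputs on which Python A raises IndexError: a cursor walking past
-- the end of str1 (one step per non-'U' direction) or of str2 (one step per 'U'/'D' direction).
def Pre_GenOutputStrs (str1 : String) (str2 : String) (TraceArr : List String) : Prop :=
  (TraceArr.countP (fun t => !(t == "U")) = 0 ∨ TraceArr.countP (fun t => !(t == "U")) < PySem.Str.len str1) ∧
  (TraceArr.countP (fun t => t == "U" || t == "D") = 0 ∨ TraceArr.countP (fun t => t == "U" || t == "D") < PySem.Str.len str2)
instance (str1 : String) (str2 : String) (TraceArr : List String) : Decidable (Pre_GenOutputStrs str1 str2 TraceArr) := by unfold Pre_GenOutputStrs; infer_instance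

def pvWitness_GenOutputStrs : String × String × List String := ("abc", "xyz", ["D", "U", "L"])

def Spec_GenOutputStrs (str1 : String) (str2 : String) (TraceArr : List String) (out : List (List String)) : Prop := out = GenOutputStrs_alt str1 str2 TraceArr
instance (str1 : String) (str2 : String) (TraceArr : List String) (out : List (List String)) : Decidable (Spec_GenOutputStrs str1 str2 TraceArr out) := by unfold Spec_GenOutputStrs; infer_instance

-- ===== CLAIM (what is proved, stated in full; the proofs are below) =====
def Claim_equal_GenOutputStrs : Prop := ∀ (str1 : String) (str2 : String) (TraceArr : List String), Dom_GenOutputStrs str1 str2 TraceArr → Pre_GenOutputStrs str1 str2 TraceArr → Spec_GenOutputStrs str1 str2 TraceArr (GenOutputStrs str1 str2 TraceArr)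

-- ===== LEMMAS AND PROOFS =====

-- canonical forms of the two output rows, recursing on the trace with a moving cursor
def gRow1 (str1 : String) : List String → Int → List String
  | [], _ => []
  | t :: ts, s => if t == "U" then "-" :: gRow1 str1 ts s else pyChar str1 s :: gRow1 str1 ts (s + 1)

def gRow2 (str2 : String) : List String → Int → List String
  | [], _ => []
  | t :: ts, s => if t == "U" || t == "D" then pyChar str2 s :: gRow2 str2 ts (s + 1) else "-" :: gRow2 str2 ts s

-- final cursor positions of A's loop
def endC (d : String → Int) : List String → Int → Int
  | [], s => s
  | t :: ts, s => endC d ts (s + d t)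

-- the tail of B's index tables (cursor value after each step)
def scanC (d : String → Int) : List String → Int → List Int
  | [], _ => []
  | t :: ts, s => (s + d t) :: scanC d ts (s + d t)

theorem foldA_eq (str1 str2 : String) (tr : List String) :
    ∀ (o1 o2 : List String) (s1 s2 : Int),
    tr.foldl (stepA str1 str2) (o1, o2, s1, s2)
    = (o1 ++ gRow1 str1 tr s1, o2 ++ gRow2 str2 tr s2, endC d1 tr s1, endC d2 tr s2) := by
  induction tr with
  | nil => intro o1 o2 s1 s2; simp [gRow1, gRow2, endC]
  | cons t ts ih =>
    intro o1 o2 s1 s2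
    rw [List.foldl_cons]
    by_cases hU : t = "U"
    · subst hU
      have hs : stepA str1 str2 (o1, o2, s1, s2) "U"
          = (o1 ++ ["-"], o2 ++ [pyChar str2 s2], s1, s2 + 1) := by simp [stepA]
      rw [hs, ih]
      simp [gRow1, gRow2, endC, d1, d2]
    · by_cases hD : t = "D"
      · subst hD
        have hs : stepA str1 str2 (o1, o2, s1, s2) "D"
            = (o1 ++ [pyChar str1 s1], o2 ++ [pyChar str2 s2], s1 + 1, s2 + 1) := by simp [stepA]
        rw [hs, ih]
        simp [gRow1, gRow2, endC, d1, d2]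
      · have hs : stepA str1 str2 (o1, o2, s1, s2) t
            = (o1 ++ [pyChar str1 s1], o2 ++ ["-"], s1 + 1, s2) := by simp [stepA, hU, hD]
        rw [hs, ih]
        simp [gRow1, gRow2, endC, d1, d2, hU, hD]

theorem foldIdx_eq (d : String → Int) (tr : List String) :
    ∀ (pre : List Int) (s : Int),
    tr.foldl (stepT d) (pre ++ [s]) = pre ++ [s] ++ scanC d tr s := by
  induction tr with
  | nil => intro pre s; simp [scanC]
  | cons t ts ih =>
    intro pre s
    rw [List.foldl_cons]
    have hs : stepT d (pre ++ [s]) t = (pre ++ [s]) ++ [s + d t] := by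
      simp [stepT, PySem.List.pyGet?_neg_one_append_singleton]
    rw [hs]
    have := ih (pre ++ [s]) (s + d t)
    simp only [List.append_assoc] at this ⊢
    rw [this]
    simp [scanC]

theorem zip1_eq (str1 : String) (tr : List String) :
    ∀ s : Int, (tr.zip (s :: scanC d1 tr s)).map
      (fun ti => if ti.1 == "U" then "-" else pyChar str1 ti.2) = gRow1 str1 tr s := by
  induction tr with
  | nil => intro s; simp [gRow1]
  | cons t ts ih =>
    intro s
    simp only [scanC, List.zip_cons_cons, List.map_cons]
    by_cases hU : t = "U"
    · subst hU
      rw [show d1 "U" = (0:Int) from by simp [d1], add_zero, ih]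
      simp [gRow1]
    · have hd : d1 t = 1 := by simp [d1, hU]
      rw [hd, ih]
      simp [gRow1, hU]

theorem zip2_eq (str2 : String) (tr : List String) :
    ∀ s : Int, (tr.zip (s :: scanC d2 tr s)).map
      (fun ti => if ti.1 == "U" || ti.1 == "D" then pyChar str2 ti.2 else "-") = gRow2 str2 tr s := by
  induction tr with
  | nil => intro s; simp [gRow2]
  | cons t ts ih =>
    intro s
    simp only [scanC, List.zip_cons_cons, List.map_cons]
    by_cases hUD : t = "U" ∨ t = "D"
    · have hd : d2 t = 1 := by rcases hUD with h | h <;> simp [d2, h]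
      rw [hd, ih]
      rcases hUD with h | h <;> simp [gRow2, h]
    · have h1 : ¬ t = "U" := fun h => hUD (Or.inl h)
      have h2 : ¬ t = "D" := fun h => hUD (Or.inr h)
      have hd : d2 t = 0 := by simp [d2, h1, h2]
      rw [hd, add_zero, ih]
      simp [gRow2, h1, h2]

-- ===== VERDICT (by name: the statement is the Claim_ definition above) =====
theorem GenOutputStrs_spec : Claim_equal_GenOutputStrs := by
  intro str1 str2 tr _ _
  show GenOutputStrs str1 str2 tr = GenOutputStrs_alt str1 str2 tr
  unfold GenOutputStrs GenOutputStrs_alt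
  have hA := foldA_eq str1 str2 tr [] [] 1 1
  have h1 := foldIdx_eq d1 tr [] 1
  have h2 := foldIdx_eq d2 tr [] 1
  simp only [List.nil_append] at hA h1 h2
  simp only [hA, h1, h2, List.singleton_append]
  rw [zip1_eq, zip2_eq]
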